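-- pv_equiv track=rewrite | github.com/onuse/em-brain | validation_runner.py | parse_study_identifier
-- ===== SOURCE A (Python) =====
-- from typing import Dict, List, Optional
--
-- def get_available_studies() -> Dict[str, Dict]:
--     """Get all available validation studies."""
--
--     studies = {
--         'embodied_learning': {
--             'biological_embodied_learning': {
--                 'path': 'validation/embodied_learning/experiments/biological_embodied_learning.py',
--                 'description': 'Biological timescale embodied learning with sensory-motor coordination',
--                 'duration': '2-8 hours',
--                 'scientific_value': 'High - Tests core embodied intelligence hypotheses'
--             }
--         },
--         'legacy_tests': {
--             'biological_timescales': {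
--                 'path': 'tests/test_biological_timescales.py',
--                 'description': 'Simple pattern learning over biological timescales',
--                 'duration': '1-8 hours',
--                 'scientific_value': 'Low - Trivial pattern learning'
--             }
--         }
--     }
--
--     return studies
--
-- def parse_study_identifier(identifier: str) -> Optional[str]:
--     """Parse study identifier and return path."""
--     studies = get_available_studies()
--
--     # Handle full identifiers like "embodied_learning.biological_embodied_learning"
--     if '.' in identifier:
--         category, study_name = identifier.split('.', 1)
--         if category in studies and study_name in studies[category]:
--             return studies[category][study_name]['path']
--
--     # Handle study names directly
--     for category, category_studies in studies.items():
--         if identifier in category_studies: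
--             return category_studies[identifier]['path']
--
--     return None
-- ===== SOURCE B (Python) =====
-- from typing import Dict, Optional
--
-- def get_available_studies() -> Dict[str, Dict]:
--     """Get all available validation studies."""
--     studies = {
--         'embodied_learning': {
--             'biological_embodied_learning': {
--                 'path': 'validation/embodied_learning/experiments/biological_embodied_learning.py',
--                 'description': 'Biological timescale embodied learning with sensory-motor coordination',
--                 'duration': '2-8 hours',
--                 'scientific_value': 'High - Tests core embodied intelligence hypotheses'
--             }
--         },
--         'legacy_tests': {
--             'biological_timescales': {
--                 'path': 'tests/test_biological_timescales.py',
--                 'description': 'Simple pattern learning over biological timescales',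
--                 'duration': '1-8 hours',
--                 'scientific_value': 'Low - Trivial pattern learning'
--             }
--         }
--     }
--     return studies
--
-- def _build_index() -> Dict[str, str]:
--     """Flat lookup table: both 'category.name' and bare 'name' map to the path
--     (first category wins for duplicate bare names)."""
--     index = {}
--     for category, category_studies in get_available_studies().items():
--         for study_name, info in category_studies.items():
--             index[f"{category}.{study_name}"] = info['path']
--             if study_name not in index:
--                 index[study_name] = info['path']
--     return index
--
-- _INDEX = _build_index()
--
-- def parse_study_identifier(identifier: str) -> Optional[str]:
--     """Parse study identifier and return path."""
--     return _INDEX.get(identifier)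
-- ===== Notes on version B (the rewrite author's own statement) =====
-- stated objective: idiomatic
-- what changed: Replaces the dotted-identifier branch plus the per-call fallback scan over categories with a flat lookup table (dotted and bare keys, first category wins) built once at module load, so each call is a single dict.get.
import Mathlib
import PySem

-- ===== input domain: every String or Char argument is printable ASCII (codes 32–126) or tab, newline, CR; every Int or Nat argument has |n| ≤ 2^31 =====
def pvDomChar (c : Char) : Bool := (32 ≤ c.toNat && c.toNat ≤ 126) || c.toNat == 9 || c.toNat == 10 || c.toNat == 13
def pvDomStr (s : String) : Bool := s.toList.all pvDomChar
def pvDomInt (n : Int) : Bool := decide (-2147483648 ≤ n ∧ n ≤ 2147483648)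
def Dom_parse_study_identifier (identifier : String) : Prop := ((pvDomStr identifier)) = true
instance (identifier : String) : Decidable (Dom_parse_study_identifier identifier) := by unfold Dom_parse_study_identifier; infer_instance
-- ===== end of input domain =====

-- B replaces A's dotted-identifier branch plus per-call fallback scan with a flat index built once and a single lookup (idiomatic).

-- ===== PORT A =====
-- the fixed study table of get_available_studies (helper data, used by both ports)
def pvInfo1 : PySem.Dict String String := PySem.Dict.ofList [
  ("path", "validation/embodied_learning/experiments/biological_embodied_learning.py"),
  ("description", "Biological timescale embodied learning with sensory-motor coordination"),
  ("duration", "2-8 hours"),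
  ("scientific_value", "High - Tests core embodied intelligence hypotheses")]
def pvInfo2 : PySem.Dict String String := PySem.Dict.ofList [
  ("path", "tests/test_biological_timescales.py"),
  ("description", "Simple pattern learning over biological timescales"),
  ("duration", "1-8 hours"),
  ("scientific_value", "Low - Trivial pattern learning")]
def pvCat1 : PySem.Dict String (PySem.Dict String String) :=
  PySem.Dict.ofList [("biological_embodied_learning", pvInfo1)]
def pvCat2 : PySem.Dict String (PySem.Dict String String) :=
  PySem.Dict.ofList [("biological_timescales", pvInfo2)]
def pvStudies : PySem.Dict String (PySem.Dict String (PySem.Dict String String)) :=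
  PySem.Dict.ofList [("embodied_learning", pvCat1), ("legacy_tests", pvCat2)]

def parse_study_identifier (identifier : String) : Option String :=
  let studies := pvStudies
  -- if '.' in identifier: category, study_name = identifier.split('.', 1); if category in studies and …: return …['path']
  let dotted : Option String :=
    if PySem.Str.isIn "." identifier then
      match PySem.Str.splitMax? identifier "." 1 with
      | some [category, study_name] =>
        (match studies.get? category with
         | some cs =>
           (match cs.get? study_name with
            | some st => st.get? "path"
            | none => none)
         | none => none)
      | _ => none
    else none
  match dotted with
  | some p => some p
  | none =>
    -- for category, category_studies in studies.items(): if identifier in category_studies: return …['path']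
    studies.items.foldl
      (fun acc p =>
        match acc with
        | some _ => acc
        | none =>
          match p.2.get? identifier with
          | some st => st.get? "path"
          | none => none)
      none

-- ===== PORT B =====
-- _build_index: flat table over 'category.name' and bare 'name' (bare key only when not already present)
def pvBuildIndex : PySem.Dict String String :=
  pvStudies.items.foldl
    (fun index cat =>
      cat.2.items.foldl
        (fun index st =>
          let index := index.insert (cat.1 ++ "." ++ st.1) (st.2.getD "path" "")
          if index.contains st.1 then index else index.insert st.1 (st.2.getD "path" ""))
        index)
    PySem.Dict.empty

-- _INDEX, built once at module load
def pvIndex : PySem.Dict String String := pvBuildIndex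

def parse_study_identifier_alt (identifier : String) : Option String :=
  pvIndex.get? identifier

-- ===== PRECONDITION & SPEC =====
def Spec_parse_study_identifier (identifier : String) (out : Option String) : Prop := out = parse_study_identifier_alt identifier
instance (identifier : String) (out : Option String) : Decidable (Spec_parse_study_identifier identifier out) := by unfold Spec_parse_study_identifier; infer_instance

-- ===== CLAIM (what is proved, stated in full; the proofs are below) =====
def Claim_equal_parse_study_identifier : Prop := ∀ (identifier : String), Dom_parse_study_identifier identifier → Spec_parse_study_identifier identifier (parse_study_identifier identifier)

-- ===== LEMMAS AND PROOFS =====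

-- the flat index, evaluated
theorem pvIndex_eq : pvIndex = PySem.Dict.mk [
    ("embodied_learning.biological_embodied_learning", "validation/embodied_learning/experiments/biological_embodied_learning.py"),
    ("biological_embodied_learning", "validation/embodied_learning/experiments/biological_embodied_learning.py"),
    ("legacy_tests.biological_timescales", "tests/test_biological_timescales.py"),
    ("biological_timescales", "tests/test_biological_timescales.py")] := by decide

theorem pvStudies_items : pvStudies.items = [("embodied_learning", pvCat1), ("legacy_tests", pvCat2)] := by decide

theorem pvStudies_get? (x : String) : pvStudies.get? x =
    if ("embodied_learning" : String) = x then some pvCat1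
    else if ("legacy_tests" : String) = x then some pvCat2 else none := by
  rw [show pvStudies = PySem.Dict.mk [("embodied_learning", pvCat1), ("legacy_tests", pvCat2)] by decide]
  have h0 : (PySem.Dict.mk ([] : List (String × PySem.Dict String (PySem.Dict String String)))).get? x = none := rfl
  by_cases e1 : ("embodied_learning" : String) = x
  · simp [PySem.Dict.get?_mk_cons, e1]
  · by_cases e2 : ("legacy_tests" : String) = x <;>
      simp [PySem.Dict.get?_mk_cons, e1, e2, h0]

theorem pvCat1_get? (x : String) : pvCat1.get? x =
    if ("biological_embodied_learning" : String) = x then some pvInfo1 else none := by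
  rw [show pvCat1 = PySem.Dict.mk [("biological_embodied_learning", pvInfo1)] by decide]
  have h0 : (PySem.Dict.mk ([] : List (String × PySem.Dict String String))).get? x = none := rfl
  by_cases e1 : ("biological_embodied_learning" : String) = x <;>
    simp [PySem.Dict.get?_mk_cons, e1, h0]

theorem pvCat2_get? (x : String) : pvCat2.get? x =
    if ("biological_timescales" : String) = x then some pvInfo2 else none := by
  rw [show pvCat2 = PySem.Dict.mk [("biological_timescales", pvInfo2)] by decide]
  have h0 : (PySem.Dict.mk ([] : List (String × PySem.Dict String String))).get? x = none := rfl
  by_cases e1 : ("biological_timescales" : String) = x <;>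
    simp [PySem.Dict.get?_mk_cons, e1, h0]

-- A's fallback loop finds nothing when identifier is neither bare study name
theorem pvLoop_none (id : String)
    (n2 : ¬ ("biological_embodied_learning" : String) = id)
    (n4 : ¬ ("biological_timescales" : String) = id) :
    (pvStudies.items.foldl
      (fun acc p =>
        match acc with
        | some _ => acc
        | none =>
          match p.2.get? id with
          | some st => st.get? "path"
          | none => none)
      (none : Option String)) = none := by
  rw [pvStudies_items]
  simp [List.foldl, pvCat1_get?, pvCat2_get?, n2, n4]

-- join with '.' (proof-only; used to reconstruct the input from its split)
def pvJoinDot : List (List Char) → List Char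
  | [] => []
  | [x] => x
  | x :: xs => x ++ '.' :: pvJoinDot xs

theorem pvJoinDot_append_singleton (xs : List (List Char)) (y : List Char) :
    pvJoinDot (xs ++ [y]) = pvJoinDot xs ++ (if xs = [] then [] else ['.']) ++ y := by
  induction xs with
  | nil => simp [pvJoinDot]
  | cons a as ih =>
    cases as with
    | nil => simp [pvJoinDot]
    | cons b bs =>
      simp only [List.cons_append, pvJoinDot] at *
      rw [ih]
      simp

theorem pvGo_join : ∀ (fuel m : Nat) (l cur : List Char) (acc : List (List Char)),
    pvJoinDot (PySem.Chars.splitOnMax.go ['.'] fuel m l cur acc) =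
      pvJoinDot (acc.reverse ++ [cur.reverse ++ l]) := by
  intro fuel
  induction fuel with
  | zero => intro m l cur acc; rw [PySem.Chars.splitOnMax.go]; all_goals simp [List.reverse_cons]
  | succ fuel ih =>
    intro m l cur acc
    cases l with
    | nil =>
      rw [PySem.Chars.splitOnMax.go]
      all_goals simp [List.reverse_cons]
    | cons c rest =>
      rw [PySem.Chars.splitOnMax.go]
      by_cases hm : m = 0
      · simp [hm, List.reverse_cons]
      · rw [if_neg hm]
        by_cases hp : List.isPrefixOf ['.'] (c :: rest) = true
        · have hpre : ['.'] <+: (c :: rest) := List.isPrefixOf_iff_prefix.mp hp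
          have hc : c = '.' := by
            rcases hpre with ⟨t, ht⟩; simp at ht; exact ht.1.symm
          rw [if_pos hp, ih]
          subst hc
          rw [show ((cur.reverse :: acc).reverse ++ [List.reverse [] ++ List.drop ['.'].length ('.' :: rest)]) = (acc.reverse ++ [cur.reverse]) ++ [rest] by simp [List.reverse_cons]]
          rw [pvJoinDot_append_singleton, pvJoinDot_append_singleton]
          by_cases ha : acc = [] <;> simp [ha, pvJoinDot, pvJoinDot_append_singleton]
        · rw [if_neg hp, ih]
          simp

-- id.split('.', 1) == [c, s]  →  id = c ++ "." ++ s
theorem pvSplit_reconstruct (id c s : String)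
    (h : PySem.Str.splitMax? id "." 1 = some [c, s]) : id = c ++ "." ++ s := by
  have h2 := congrArg (Option.map (List.map String.toList)) h
  rw [PySem.Str.splitMax?_map] at h2
  simp only [PySem.Chars.splitMax?, PySem.Chars.splitOnMax, Option.map_some, List.map] at h2
  have h3 : PySem.Chars.splitOnMax.go (".".toList) (id.toList.length + 1) (Int.toNat 1) id.toList [] [] = [c.toList, s.toList] := by
    simp_all
  have h4 := congrArg pvJoinDot h3
  rw [show (".".toList) = ['.'] by decide] at h4
  rw [pvGo_join] at h4
  simp [pvJoinDot] at h4
  have h5 : id.toList = (c ++ ("." ++ s)).toList := by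
    simp [String.toList_append, show (".".toList) = ['.'] from by decide, h4]
  have h6 := congrArg String.ofList h5
  simp only [String.ofList_toList] at h6
  rw [h6, String.append_assoc]

theorem pvAB_eq (id : String) : parse_study_identifier id = parse_study_identifier_alt id := by
  by_cases h1 : id = "embodied_learning.biological_embodied_learning"
  · subst h1; decide
  by_cases h2 : id = "biological_embodied_learning"
  · subst h2; decide
  by_cases h3 : id = "legacy_tests.biological_timescales"
  · subst h3; decide
  by_cases h4 : id = "biological_timescales"
  · subst h4; decide
  have n1 : ¬ ("embodied_learning.biological_embodied_learning" : String) = id := fun e => h1 e.symm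
  have n2 : ¬ ("biological_embodied_learning" : String) = id := fun e => h2 e.symm
  have n3 : ¬ ("legacy_tests.biological_timescales" : String) = id := fun e => h3 e.symm
  have n4 : ¬ ("biological_timescales" : String) = id := fun e => h4 e.symm
  have halt : parse_study_identifier_alt id = none := by
    rw [parse_study_identifier_alt, pvIndex_eq]
    simp [PySem.Dict.get?, n1, n2, n3, n4]
  rw [halt]
  simp only [parse_study_identifier]
  by_cases hdot : PySem.Str.isIn "." id = true
  · rw [if_pos hdot]
    cases hsp : PySem.Str.splitMax? id "." 1 with
    | none => simp [pvLoop_none id n2 n4]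
    | some ps =>
      match ps with
      | [] => simp [pvLoop_none id n2 n4]
      | [c] => simp [pvLoop_none id n2 n4]
      | c :: s :: t :: r => simp [pvLoop_none id n2 n4]
      | [c, s] =>
        by_cases hc1 : ("embodied_learning" : String) = c
        · by_cases hs1 : ("biological_embodied_learning" : String) = s
          · exfalso
            apply h1
            rw [pvSplit_reconstruct id c s hsp, ← hc1, ← hs1]
            decide
          · simp [pvStudies_get?, pvCat1_get?, hc1, hs1, pvLoop_none id n2 n4]
        · by_cases hc2 : ("legacy_tests" : String) = c
          · by_cases hs2 : ("biological_timescales" : String) = s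
            · exfalso
              apply h3
              rw [pvSplit_reconstruct id c s hsp, ← hc2, ← hs2]
              decide
            · simp [pvStudies_get?, pvCat2_get?, hc1, hc2, hs2, pvLoop_none id n2 n4]
          · simp [pvStudies_get?, hc1, hc2, pvLoop_none id n2 n4]
  · rw [if_neg hdot]
    simp [pvLoop_none id n2 n4]

-- ===== VERDICT (by name: the statement is the Claim_ definition above) =====
theorem parse_study_identifier_spec : Claim_equal_parse_study_identifier := by
  intro id _
  exact pvAB_eq id
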